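-- pv_equiv track=rewrite | github.com/potapenko/playphraseme-karaoke-mixer | process_videos.py | common_contiguous_subsequence
-- ===== SOURCE A (Python) =====
-- def contains_contiguous_subsequence(lst, sub):
--     L = len(sub)
--     for i in range(len(lst) - L + 1):
--         if lst[i:i+L] == sub:
--             return True
--     return False
--
-- def common_contiguous_subsequence(normalized_lists):
--     first = normalized_lists[0]
--     n = len(first)
--     for length in range(n, 0, -1):
--         for start in range(0, n - length + 1):
--             candidate = first[start:start+length]
--             if all(contains_contiguous_subsequence(other, candidate) for other in normalized_lists[1:]):
--                 candidate_str = " ".join(candidate)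
--                 return candidate_str
--     return ""
-- ===== SOURCE B (Python) =====
-- def common_contiguous_subsequence(normalized_lists):
--     first = normalized_lists[0]
--     rest = normalized_lists[1:]
--     n = len(first)
--     for length in range(n, 0, -1):
--         # intersection of the length-window sets of all other lists (None = no constraint)
--         common = None
--         for other in rest:
--             grams = {tuple(other[i:i + length]) for i in range(len(other) - length + 1)}
--             common = grams if common is None else common & grams
--         for start in range(n - length + 1):
--             cand = tuple(first[start:start + length])
--             if common is None or cand in common:
--                 return " ".join(cand)
--     return ""
-- ===== Notes on version B (the rewrite author's own statement) =====
-- stated objective: alternative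
-- what changed: A tests each candidate window by brute-force scanning every other list; B, per length, builds each other list's set of length-windows once and intersects them, then picks the earliest window of the first list in the intersection.
import Mathlib
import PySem

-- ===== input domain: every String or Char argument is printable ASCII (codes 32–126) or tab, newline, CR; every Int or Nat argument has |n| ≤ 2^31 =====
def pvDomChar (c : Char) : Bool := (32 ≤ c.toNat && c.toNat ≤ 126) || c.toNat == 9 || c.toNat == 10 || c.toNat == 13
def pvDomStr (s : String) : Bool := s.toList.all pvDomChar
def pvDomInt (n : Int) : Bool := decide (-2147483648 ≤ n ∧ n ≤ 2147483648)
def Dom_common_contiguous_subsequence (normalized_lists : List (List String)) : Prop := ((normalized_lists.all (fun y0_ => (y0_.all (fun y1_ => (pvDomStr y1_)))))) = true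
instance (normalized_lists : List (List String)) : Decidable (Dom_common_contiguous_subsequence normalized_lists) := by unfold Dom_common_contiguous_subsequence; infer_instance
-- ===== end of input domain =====

-- B replaces A's per-candidate scan of every other list by a per-length intersection of
-- window sets built once; equivalence of the return value is proved on non-empty input.

-- ===== PORT A =====
def contains_contiguous_subsequence (lst sub : List String) : Bool :=
  let L : Int := sub.length
  (PySem.List.pyRange 0 ((lst.length : Int) - L + 1) 1).any
    (fun i => PySem.List.slice lst (some i) (some (i + L)) == sub)

def common_contiguous_subsequence (normalized_lists : List (List String)) : String :=
  match normalized_lists with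
  | [] => ""   -- Python raises IndexError here; excluded by Pre_
  | first :: rest =>
    let n : Int := first.length
    ((PySem.List.pyRange n 0 (-1)).findSome? (fun length =>
      (PySem.List.pyRange 0 (n - length + 1) 1).findSome? (fun start =>
        let candidate := PySem.List.slice first (some start) (some (start + length))
        if rest.all (fun other => contains_contiguous_subsequence other candidate)
        then some (PySem.Str.join " " candidate) else none))).getD ""

-- ===== PORT B =====
-- the set comprehension {tuple(other[i:i+length]) for i in range(len(other)-length+1)}
def gramsOf (length : Int) (other : List String) : PySem.Set (List String) :=
  (PySem.List.pyRange 0 ((other.length : Int) - length + 1) 1).foldl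
    (fun s i => PySem.Set.add s (PySem.List.slice other (some i) (some (i + length))))
    PySem.Set.empty

-- 'common is None or cand in common'
def optMem (o : Option (PySem.Set (List String))) (c : List String) : Bool :=
  match o with
  | none => true
  | some s => PySem.Set.contains s c

def common_contiguous_subsequence_alt (normalized_lists : List (List String)) : String :=
  match normalized_lists with
  | [] => ""   -- Python raises IndexError here; excluded by Pre_
  | first :: rest =>
    let n : Int := first.length
    ((PySem.List.pyRange n 0 (-1)).findSome? (fun length =>
      let common : Option (PySem.Set (List String)) :=
        rest.foldl (fun acc other =>
          some (match acc with
                | none => gramsOf length other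
                | some c => PySem.Set.inter c (gramsOf length other))) none
      (PySem.List.pyRange 0 (n - length + 1) 1).findSome? (fun start =>
        let cand := PySem.List.slice first (some start) (some (start + length))
        if optMem common cand then some (PySem.Str.join " " cand) else none))).getD ""

-- ===== PRECONDITION & SPEC =====
-- Pre_ excludes the empty outer list, on which the Python A raises IndexError.
def Pre_common_contiguous_subsequence (normalized_lists : List (List String)) : Prop :=
  normalized_lists ≠ []
instance (normalized_lists : List (List String)) : Decidable (Pre_common_contiguous_subsequence normalized_lists) := by unfold Pre_common_contiguous_subsequence; infer_instance

def pvWitness_common_contiguous_subsequence : List (List String) := [["a", "b"], ["b"]]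

def Spec_common_contiguous_subsequence (normalized_lists : List (List String)) (out : String) : Prop := out = common_contiguous_subsequence_alt normalized_lists
instance (normalized_lists : List (List String)) (out : String) : Decidable (Spec_common_contiguous_subsequence normalized_lists out) := by unfold Spec_common_contiguous_subsequence; infer_instance

-- ===== CLAIM (what is proved, stated in full; the proofs are below) =====
def Claim_equal_common_contiguous_subsequence : Prop := ∀ (normalized_lists : List (List String)), Dom_common_contiguous_subsequence normalized_lists → Pre_common_contiguous_subsequence normalized_lists → Spec_common_contiguous_subsequence normalized_lists (common_contiguous_subsequence normalized_lists)

-- ===== LEMMAS AND PROOFS =====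

theorem pv_findSome?_congr {α β : Type} {l : List α} {f g : α → Option β}
    (h : ∀ x ∈ l, f x = g x) : l.findSome? f = l.findSome? g := by
  induction l with
  | nil => rfl
  | cons a t ih =>
    simp only [List.findSome?_cons, h a (List.mem_cons_self)]
    cases g a with
    | none => exact ih (fun x hx => h x (List.mem_cons_of_mem _ hx))
    | some b => rfl

theorem pv_all_congr {α : Type} {l : List α} {f g : α → Bool}
    (h : ∀ x ∈ l, f x = g x) : l.all f = l.all g := by
  induction l with
  | nil => rfl
  | cons a t ih =>
    simp only [List.all_cons, h a (List.mem_cons_self)]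
    rw [ih (fun x hx => h x (List.mem_cons_of_mem _ hx))]

-- membership in the window set = A's brute-force containment test
theorem pv_grams_contains (length : Int) (other : List String) (cand : List String)
    (hl : (cand.length : Int) = length) :
    PySem.Set.contains (gramsOf length other) cand
      = contains_contiguous_subsequence other cand := by
  rw [Bool.eq_iff_iff]
  simp only [gramsOf, contains_contiguous_subsequence, hl,
    PySem.Set.contains_eq_listContains, List.contains_iff_mem,
    PySem.Set.mem_foldl_add, List.any_eq_true, beq_iff_eq]
  constructor
  · rintro (h | ⟨i, hi, h⟩)
    · simp [PySem.Set.empty] at h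
    · exact ⟨i, hi, h.symm⟩
  · rintro ⟨i, hi, h⟩
    exact Or.inr ⟨i, hi, h.symm⟩

-- the intersection fold tests membership in every window set
theorem pv_fold_optMem (length : Int) (cand : List String) (rest : List (List String))
    (acc : Option (PySem.Set (List String))) :
    optMem (rest.foldl (fun acc other =>
        some (match acc with
              | none => gramsOf length other
              | some c => PySem.Set.inter c (gramsOf length other))) acc) cand
      = (optMem acc cand && rest.all (fun other => PySem.Set.contains (gramsOf length other) cand)) := by
  induction rest generalizing acc with
  | nil => simp
  | cons o t ih =>
    rw [List.foldl_cons, ih, List.all_cons]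
    have hstep : optMem (some (match acc with
        | none => gramsOf length o
        | some c => PySem.Set.inter c (gramsOf length o))) cand
        = (optMem acc cand && PySem.Set.contains (gramsOf length o) cand) := by
      cases acc with
      | none => simp [optMem]
      | some c =>
        simp only [optMem]
        rw [Bool.eq_iff_iff, Bool.and_eq_true]
        simp only [PySem.Set.contains_eq_listContains, List.contains_iff_mem]
        exact PySem.Set.mem_inter c (gramsOf length o) cand
    rw [hstep, Bool.and_assoc]

theorem pv_cand_length (first : List String) (start length : Int)
    (h0 : 0 ≤ start) (h1 : 0 < length) (h2 : start + length ≤ (first.length : Int)) :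
    (((PySem.List.slice first (some start) (some (start + length))).length : Int)) = length := by
  rw [PySem.List.slice_toNat first h0 (by omega)]
  simp only [List.length_take, List.length_drop]
  omega

-- ===== VERDICT (by name: the statement is the Claim_ definition above) =====
theorem common_contiguous_subsequence_spec : Claim_equal_common_contiguous_subsequence := by
  intro normalized_lists _ hpre
  unfold Spec_common_contiguous_subsequence
  match normalized_lists with
  | [] => exact absurd rfl hpre
  | first :: rest =>
    simp only [common_contiguous_subsequence, common_contiguous_subsequence_alt]
    congr 1
    apply pv_findSome?_congr
    intro length hlen
    rw [PySem.List.mem_pyRange_neg_one] at hlen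
    apply pv_findSome?_congr
    intro start hstart
    rw [PySem.List.mem_pyRange_one] at hstart
    have hl := pv_cand_length first start length hstart.1 hlen.1 (by omega)
    rw [pv_fold_optMem]
    simp only [optMem, Bool.true_and]
    rw [pv_all_congr (fun other _ => pv_grams_contains length other _ hl)]
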